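-- pv_equiv track=rewrite | github.com/rostkick/snakemake_ngs_modules | modules/scripts/functions.py | get_inputs
-- ===== SOURCE A (Python) =====
-- from itertools import permutations
--
-- def get_inputs(run, mode, patients=None):
-- 	if ('somatic' in mode) | (mode == 'all'):
-- 		final_output_soma = [f'results/{run}/somatic/{patient}/plots/plot.pdf' for patient in patients] + \
-- 							[f'results/{run}/somatic/{patient}/annotation/somatic.annotated.vcf.gz' for patient in patients]
-- 	final_output_germ = [f'results/{run}/germline/vcf/germline.annotated.vcf.gz']
-- 	final_output_sv = [f'results/{run}/germline/sv/sv.annotated.vcf.gz']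
--
--
-- 	possible_mode_spelling_all = set([','.join(i) for i in list(permutations(['germline', 'somatic', 'sv']))] + ['all'])
-- 	possible_mode_spelling_soma_germ = set([','.join(i) for i in list(permutations(['germline', 'somatic']))])
-- 	possible_mode_spelling_germ_sv = set([','.join(i) for i in list(permutations(['germline', 'sv']))])
-- 	possible_mode_spelling_soma_sv = set([','.join(i) for i in list(permutations(['somatic', 'sv']))])
--
-- 	if mode in possible_mode_spelling_all:
-- 		return final_output_soma + final_output_germ + final_output_sv
-- 	elif mode in possible_mode_spelling_soma_germ:
-- 		return final_output_soma + final_output_germ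
-- 	elif mode in possible_mode_spelling_germ_sv:
-- 		return final_output_germ + final_output_sv
-- 	elif mode in possible_mode_spelling_soma_sv:
-- 		return final_output_soma + final_output_sv
-- 	elif mode == 'somatic':
-- 		return final_output_soma
-- 	elif mode == 'germline':
-- 		return final_output_germ
-- 	elif mode == 'sv':
-- 		return final_output_sv
-- 	else:
-- 		error_message = "\x1b[0;31;40m" +"incorrect mode spelling!"+"\x1b[0m"
-- 		assert False, error_message
-- ===== SOURCE B (Python) =====
-- _MODE_FLAGS = {
--     'germline,somatic,sv': (True, True, True),
--     'germline,sv,somatic': (True, True, True),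
--     'somatic,germline,sv': (True, True, True),
--     'somatic,sv,germline': (True, True, True),
--     'sv,germline,somatic': (True, True, True),
--     'sv,somatic,germline': (True, True, True),
--     'all': (True, True, True),
--     'germline,somatic': (True, True, False),
--     'somatic,germline': (True, True, False),
--     'germline,sv': (False, True, True),
--     'sv,germline': (False, True, True),
--     'somatic,sv': (True, False, True),
--     'sv,somatic': (True, False, True),
--     'somatic': (True, False, False),
--     'germline': (False, True, False),
--     'sv': (False, False, True),
-- }
--
-- def get_inputs(run, mode, patients=None):
--     flags = _MODE_FLAGS.get(mode)
--     assert flags is not None, "\x1b[0;31;40m" + "incorrect mode spelling!" + "\x1b[0m"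
--     soma, germ, sv = flags
--     out = []
--     if soma:
--         out += [f'results/{run}/somatic/{patient}/plots/plot.pdf' for patient in patients]
--         out += [f'results/{run}/somatic/{patient}/annotation/somatic.annotated.vcf.gz' for patient in patients]
--     if germ:
--         out.append(f'results/{run}/germline/vcf/germline.annotated.vcf.gz')
--     if sv:
--         out.append(f'results/{run}/germline/sv/sv.annotated.vcf.gz')
--     return out
-- ===== Notes on version B (the rewrite author's own statement) =====
-- stated objective: simpler
-- what changed: Replaced the four permutation-set constructions and the seven-branch if/elif dispatch with a single literal dict mapping each valid mode spelling to (soma,germ,sv) inclusion flags, assembling the result once in fixed soma->germ->sv order.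
import Mathlib
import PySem

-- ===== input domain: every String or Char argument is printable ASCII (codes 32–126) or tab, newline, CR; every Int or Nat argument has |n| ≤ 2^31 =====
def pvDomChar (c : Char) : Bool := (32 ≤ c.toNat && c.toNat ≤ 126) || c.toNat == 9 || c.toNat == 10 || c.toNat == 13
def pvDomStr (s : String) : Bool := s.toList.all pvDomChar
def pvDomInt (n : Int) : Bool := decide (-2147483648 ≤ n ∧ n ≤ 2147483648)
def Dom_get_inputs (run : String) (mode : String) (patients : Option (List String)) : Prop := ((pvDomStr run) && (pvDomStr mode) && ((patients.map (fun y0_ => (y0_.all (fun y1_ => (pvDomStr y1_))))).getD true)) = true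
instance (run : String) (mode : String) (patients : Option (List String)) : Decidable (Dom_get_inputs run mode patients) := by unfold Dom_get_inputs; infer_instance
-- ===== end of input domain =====

-- B replaces A's permutation-set building and if/elif chain by one literal mode→flags
-- dictionary and a single fixed-order assembly; return values are identical on Pre_.

-- ===== PORT A =====
-- A iterates `patients` when ('somatic' in mode) | (mode == 'all'); with patients = none
-- that is a TypeError (excluded by Pre_); the port returns [] there as a placeholder.
def get_inputs (run : String) (mode : String) (patients : Option (List String)) : List String :=
  let final_output_soma : List String :=
    if PySem.Str.isIn "somatic" mode || (mode == "all") then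
      match patients with
      | some ps =>
          ps.map (fun patient => "results/" ++ run ++ "/somatic/" ++ patient ++ "/plots/plot.pdf")
          ++ ps.map (fun patient => "results/" ++ run ++ "/somatic/" ++ patient ++ "/annotation/somatic.annotated.vcf.gz")
      | none => []          -- Python: TypeError (outside Pre_)
    else []                  -- Python: final_output_soma left undefined (only read when the condition held)
  let final_output_germ : List String := ["results/" ++ run ++ "/germline/vcf/germline.annotated.vcf.gz"]
  let final_output_sv : List String := ["results/" ++ run ++ "/germline/sv/sv.annotated.vcf.gz"]
  -- the comprehensions over literal permutations, written out in itertools order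
  let possible_mode_spelling_all : PySem.Set String :=
    PySem.Set.ofList ["germline,somatic,sv", "germline,sv,somatic", "somatic,germline,sv",
                      "somatic,sv,germline", "sv,germline,somatic", "sv,somatic,germline", "all"]
  let possible_mode_spelling_soma_germ : PySem.Set String := PySem.Set.ofList ["germline,somatic", "somatic,germline"]
  let possible_mode_spelling_germ_sv : PySem.Set String := PySem.Set.ofList ["germline,sv", "sv,germline"]
  let possible_mode_spelling_soma_sv : PySem.Set String := PySem.Set.ofList ["somatic,sv", "sv,somatic"]
  if PySem.Set.contains possible_mode_spelling_all mode then
    final_output_soma ++ final_output_germ ++ final_output_sv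
  else if PySem.Set.contains possible_mode_spelling_soma_germ mode then
    final_output_soma ++ final_output_germ
  else if PySem.Set.contains possible_mode_spelling_germ_sv mode then
    final_output_germ ++ final_output_sv
  else if PySem.Set.contains possible_mode_spelling_soma_sv mode then
    final_output_soma ++ final_output_sv
  else if mode == "somatic" then final_output_soma
  else if mode == "germline" then final_output_germ
  else if mode == "sv" then final_output_sv
  else []                    -- Python: AssertionError (outside Pre_)

-- ===== PORT B =====
def pvModeFlags : PySem.Dict String (Bool × Bool × Bool) :=
  PySem.Dict.ofList
    [("germline,somatic,sv", (true, true, true)), ("germline,sv,somatic", (true, true, true)),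
     ("somatic,germline,sv", (true, true, true)), ("somatic,sv,germline", (true, true, true)),
     ("sv,germline,somatic", (true, true, true)), ("sv,somatic,germline", (true, true, true)),
     ("all", (true, true, true)),
     ("germline,somatic", (true, true, false)), ("somatic,germline", (true, true, false)),
     ("germline,sv", (false, true, true)), ("sv,germline", (false, true, true)),
     ("somatic,sv", (true, false, true)), ("sv,somatic", (true, false, true)),
     ("somatic", (true, false, false)), ("germline", (false, true, false)), ("sv", (false, false, true))]

def get_inputs_alt (run : String) (mode : String) (patients : Option (List String)) : List String :=
  match PySem.Dict.get? pvModeFlags mode with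
  | none => []               -- Python: AssertionError (outside Pre_)
  | some (soma, germ, sv) =>
    (if soma then
       (match patients with
        | some ps =>
            ps.map (fun patient => "results/" ++ run ++ "/somatic/" ++ patient ++ "/plots/plot.pdf")
            ++ ps.map (fun patient => "results/" ++ run ++ "/somatic/" ++ patient ++ "/annotation/somatic.annotated.vcf.gz")
        | none => [])        -- Python: TypeError (outside Pre_)
     else [])
    ++ (if germ then ["results/" ++ run ++ "/germline/vcf/germline.annotated.vcf.gz"] else [])
    ++ (if sv then ["results/" ++ run ++ "/germline/sv/sv.annotated.vcf.gz"] else [])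

-- ===== PRECONDITION & SPEC =====
-- Pre_ excludes exactly the inputs where A raises: an unknown mode spelling
-- (AssertionError) and patients = None while the somatic block is built (TypeError).
def pvValidModes : List String :=
  ["germline,somatic,sv", "germline,sv,somatic", "somatic,germline,sv", "somatic,sv,germline",
   "sv,germline,somatic", "sv,somatic,germline", "all", "germline,somatic", "somatic,germline",
   "germline,sv", "sv,germline", "somatic,sv", "sv,somatic", "somatic", "germline", "sv"]

def Pre_get_inputs (run : String) (mode : String) (patients : Option (List String)) : Prop :=
  mode ∈ pvValidModes ∧ ((PySem.Str.isIn "somatic" mode = true ∨ mode = "all") → patients ≠ none)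
instance (run : String) (mode : String) (patients : Option (List String)) : Decidable (Pre_get_inputs run mode patients) := by unfold Pre_get_inputs; infer_instance

def pvWitness_get_inputs : String × String × Option (List String) := ("run1", "somatic,sv", some ["p1", "p2"])

def Spec_get_inputs (run : String) (mode : String) (patients : Option (List String)) (out : List String) : Prop := out = get_inputs_alt run mode patients
instance (run : String) (mode : String) (patients : Option (List String)) (out : List String) : Decidable (Spec_get_inputs run mode patients out) := by unfold Spec_get_inputs; infer_instance

-- ===== CLAIM (what is proved, stated in full; the proofs are below) =====
def Claim_equal_get_inputs : Prop := ∀ (run : String) (mode : String) (patients : Option (List String)), Dom_get_inputs run mode patients → Pre_get_inputs run mode patients → Spec_get_inputs run mode patients (get_inputs run mode patients)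

-- ===== LEMMAS AND PROOFS =====

-- ===== VERDICT (by name: the statement is the Claim_ definition above) =====
theorem get_inputs_spec : Claim_equal_get_inputs := by
  intro run mode patients _ hpre
  obtain ⟨hmode, hpat⟩ := hpre
  unfold Spec_get_inputs
  simp only [pvValidModes, List.mem_cons, List.mem_singleton, List.not_mem_nil, or_false] at hmode
  rcases hmode with rfl|rfl|rfl|rfl|rfl|rfl|rfl|rfl|rfl|rfl|rfl|rfl|rfl|rfl|rfl|rfl
  · cases patients with
    | none => exact absurd rfl (hpat (by decide))
    | some ps =>
      have hA : PySem.Str.isIn "somatic" "germline,somatic,sv" = true := by decide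
      have hB : pvModeFlags.get? "germline,somatic,sv" = some (true, true, true) := by decide
      simp at hA
      simp [get_inputs, get_inputs_alt, hA, hB]
  · cases patients with
    | none => exact absurd rfl (hpat (by decide))
    | some ps =>
      have hA : PySem.Str.isIn "somatic" "germline,sv,somatic" = true := by decide
      have hB : pvModeFlags.get? "germline,sv,somatic" = some (true, true, true) := by decide
      simp at hA
      simp [get_inputs, get_inputs_alt, hA, hB]
  · cases patients with
    | none => exact absurd rfl (hpat (by decide))
    | some ps =>
      have hA : PySem.Str.isIn "somatic" "somatic,germline,sv" = true := by decide
      have hB : pvModeFlags.get? "somatic,germline,sv" = some (true, true, true) := by decide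
      simp at hA
      simp [get_inputs, get_inputs_alt, hA, hB]
  · cases patients with
    | none => exact absurd rfl (hpat (by decide))
    | some ps =>
      have hA : PySem.Str.isIn "somatic" "somatic,sv,germline" = true := by decide
      have hB : pvModeFlags.get? "somatic,sv,germline" = some (true, true, true) := by decide
      simp at hA
      simp [get_inputs, get_inputs_alt, hA, hB]
  · cases patients with
    | none => exact absurd rfl (hpat (by decide))
    | some ps =>
      have hA : PySem.Str.isIn "somatic" "sv,germline,somatic" = true := by decide
      have hB : pvModeFlags.get? "sv,germline,somatic" = some (true, true, true) := by decide
      simp at hA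
      simp [get_inputs, get_inputs_alt, hA, hB]
  · cases patients with
    | none => exact absurd rfl (hpat (by decide))
    | some ps =>
      have hA : PySem.Str.isIn "somatic" "sv,somatic,germline" = true := by decide
      have hB : pvModeFlags.get? "sv,somatic,germline" = some (true, true, true) := by decide
      simp at hA
      simp [get_inputs, get_inputs_alt, hA, hB]
  · cases patients with
    | none => exact absurd rfl (hpat (by decide))
    | some ps =>
      have hA : PySem.Str.isIn "somatic" "all" = false := by decide
      have hB : pvModeFlags.get? "all" = some (true, true, true) := by decide
      simp at hA
      simp [get_inputs, get_inputs_alt, hA, hB]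
  · cases patients with
    | none => exact absurd rfl (hpat (by decide))
    | some ps =>
      have hA : PySem.Str.isIn "somatic" "germline,somatic" = true := by decide
      have hB : pvModeFlags.get? "germline,somatic" = some (true, true, false) := by decide
      simp at hA
      simp [get_inputs, get_inputs_alt, hA, hB]
  · cases patients with
    | none => exact absurd rfl (hpat (by decide))
    | some ps =>
      have hA : PySem.Str.isIn "somatic" "somatic,germline" = true := by decide
      have hB : pvModeFlags.get? "somatic,germline" = some (true, true, false) := by decide
      simp at hA
      simp [get_inputs, get_inputs_alt, hA, hB]
  · have hA : PySem.Str.isIn "somatic" "germline,sv" = false := by decide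
    have hB : pvModeFlags.get? "germline,sv" = some (false, true, true) := by decide
    simp at hA
    simp [get_inputs, get_inputs_alt, hA, hB]
  · have hA : PySem.Str.isIn "somatic" "sv,germline" = false := by decide
    have hB : pvModeFlags.get? "sv,germline" = some (false, true, true) := by decide
    simp at hA
    simp [get_inputs, get_inputs_alt, hA, hB]
  · cases patients with
    | none => exact absurd rfl (hpat (by decide))
    | some ps =>
      have hA : PySem.Str.isIn "somatic" "somatic,sv" = true := by decide
      have hB : pvModeFlags.get? "somatic,sv" = some (true, false, true) := by decide
      simp at hA
      simp [get_inputs, get_inputs_alt, hA, hB]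
  · cases patients with
    | none => exact absurd rfl (hpat (by decide))
    | some ps =>
      have hA : PySem.Str.isIn "somatic" "sv,somatic" = true := by decide
      have hB : pvModeFlags.get? "sv,somatic" = some (true, false, true) := by decide
      simp at hA
      simp [get_inputs, get_inputs_alt, hA, hB]
  · cases patients with
    | none => exact absurd rfl (hpat (by decide))
    | some ps =>
      have hA : PySem.Str.isIn "somatic" "somatic" = true := by decide
      have hB : pvModeFlags.get? "somatic" = some (true, false, false) := by decide
      simp at hA
      simp [get_inputs, get_inputs_alt, hA, hB]
  · have hA : PySem.Str.isIn "somatic" "germline" = false := by decide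
    have hB : pvModeFlags.get? "germline" = some (false, true, false) := by decide
    simp at hA
    simp [get_inputs, get_inputs_alt, hA, hB]
  · have hA : PySem.Str.isIn "somatic" "sv" = false := by decide
    have hB : pvModeFlags.get? "sv" = some (false, false, true) := by decide
    simp at hA
    simp [get_inputs, get_inputs_alt, hA, hB]
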